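-- pv_equiv track=rewrite | github.com/xin-shang/ICT_SP5_Team47_PythonCodeChecker | project/bin/pythonDB/PYDb_qnsDetectWhile.py | checkFinalImportRow
-- ===== SOURCE A (Python) =====
-- def checkFinalImportRow(stringList):
--     countImport = 0
--     row = 0
--     countImport_2 = 0
--
--     for line in stringList:
--         if "import" in line:
--             countImport = countImport + 1
--
--     if  countImport != 0:
--         for line in stringList:
--             if "import" in line:
--                 countImport_2 = countImport_2 + 1
--             if countImport_2 == countImport:
--                 break
--             row = row + 1
--     return row
-- ===== SOURCE B (Python) =====
-- def checkFinalImportRow(stringList):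
--     for i, line in reversed(list(enumerate(stringList))):
--         if "import" in line:
--             return i
--     return 0
-- ===== Notes on version B (the rewrite author's own statement) =====
-- stated objective: simpler
-- what changed: Replaced A's two-pass count-then-walk-forward-with-break logic by a single reverse scan that returns the first (i.e. last) index whose line contains 'import', defaulting to 0.
import Mathlib
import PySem

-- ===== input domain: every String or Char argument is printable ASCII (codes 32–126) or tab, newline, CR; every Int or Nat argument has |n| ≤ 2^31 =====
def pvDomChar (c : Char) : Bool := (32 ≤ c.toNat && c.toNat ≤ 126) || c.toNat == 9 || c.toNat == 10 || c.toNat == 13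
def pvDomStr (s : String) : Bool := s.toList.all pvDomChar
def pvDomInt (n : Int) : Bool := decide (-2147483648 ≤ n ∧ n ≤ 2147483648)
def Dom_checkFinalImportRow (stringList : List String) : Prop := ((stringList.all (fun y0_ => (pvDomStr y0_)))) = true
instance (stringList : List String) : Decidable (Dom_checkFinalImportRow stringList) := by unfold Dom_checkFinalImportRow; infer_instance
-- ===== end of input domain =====

-- B replaces A's count-then-walk-forward two-pass logic with a single reverse scan (simpler).


-- the test '"import" in line', shared by both ports
def pvHasImport (line : String) : Bool := PySem.Str.isIn "import" line

-- ===== PORT A =====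
-- second loop of A, with its break: stop (returning row) when countImport_2 reaches countImport
def pvALoop : List String → Int → Int → Int → Int
  | [], _, _, row => row
  | line :: rest, count, c2, row =>
      let c2' := if pvHasImport line then c2 + 1 else c2
      if c2' = count then row else pvALoop rest count c2' (row + 1)

def checkFinalImportRow (stringList : List String) : Int :=
  let countImport := stringList.foldl (fun c line => if pvHasImport line then c + 1 else c) 0
  if countImport ≠ 0 then pvALoop stringList countImport 0 0 else 0

-- ===== PORT B =====
-- 'for i, line in reversed(list(enumerate(stringList))): if "import" in line: return i' ; 'return 0'
def pvBFind : List (Int × String) → Int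
  | [] => 0
  | (i, line) :: rest => if pvHasImport line then i else pvBFind rest

def checkFinalImportRow_alt (stringList : List String) : Int :=
  pvBFind (PySem.List.enumerate stringList 0).reverse

-- ===== PRECONDITION & SPEC =====
def Spec_checkFinalImportRow (stringList : List String) (out : Int) : Prop := out = checkFinalImportRow_alt stringList
instance (stringList : List String) (out : Int) : Decidable (Spec_checkFinalImportRow stringList out) := by unfold Spec_checkFinalImportRow; infer_instance

-- ===== CLAIM =====
def Claim_equal_checkFinalImportRow : Prop := ∀ (stringList : List String), Dom_checkFinalImportRow stringList → Spec_checkFinalImportRow stringList (checkFinalImportRow stringList)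

-- ===== LEMMAS AND PROOFS =====

-- number of lines containing "import"
def pvCnt : List String → Int
  | [] => 0
  | a :: t => (if pvHasImport a then 1 else 0) + pvCnt t

-- index of the last line containing "import" (meaningful when 1 ≤ pvCnt l)
def pvLidx : List String → Int
  | [] => 0
  | _ :: t => if 1 ≤ pvCnt t then 1 + pvLidx t else 0

theorem pvCnt_nonneg (l : List String) : 0 ≤ pvCnt l := by
  induction l with
  | nil => simp [pvCnt]
  | cons a t ih => simp only [pvCnt]; split <;> omega

theorem pvFoldl_cnt (l : List String) (c : Int) :
    l.foldl (fun c line => if pvHasImport line then c + 1 else c) c = c + pvCnt l := by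
  induction l generalizing c with
  | nil => simp [pvCnt]
  | cons a t ih => simp only [List.foldl, pvCnt]; split <;> rw [ih] <;> omega

theorem pvCnt_pos_iff_any (l : List String) :
    (1 ≤ pvCnt l) ↔ (l.any pvHasImport = true) := by
  induction l with
  | nil => simp [pvCnt]
  | cons a t ih =>
    simp only [pvCnt, List.any_cons, Bool.or_eq_true]
    have := pvCnt_nonneg t
    by_cases h : pvHasImport a = true <;> simp [h, ← ih] <;> omega

theorem pvALoop_eq (l : List String) : ∀ (c2 row count : Int),
    count = c2 + pvCnt l → 1 ≤ pvCnt l → pvALoop l count c2 row = row + pvLidx l := by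
  induction l with
  | nil => intro c2 row count _ h1; simp [pvCnt] at h1
  | cons a t ih =>
    intro c2 row count hc h1
    simp only [pvALoop, pvLidx]
    have hnn := pvCnt_nonneg t
    by_cases ht : 1 ≤ pvCnt t
    · -- more imports remain: no break here
      have hne : (if pvHasImport a then c2 + 1 else c2) ≠ count := by
        simp only [pvCnt] at hc
        by_cases hA : pvHasImport a = true <;> simp [hA] at hc ⊢ <;> omega
      rw [if_neg hne, ih _ _ _ (by
        simp only [pvCnt] at hc ⊢
        by_cases hA : pvHasImport a = true <;> simp [hA] at hc ⊢ <;> omega) ht]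
      rw [if_pos ht]; omega
    · -- this is the last import: break, returning row
      have ht0 : pvCnt t = 0 := by omega
      have ha : pvHasImport a = true := by
        simp only [pvCnt, ht0] at h1; by_contra h; simp [h] at h1
      have hbr : (if pvHasImport a then c2 + 1 else c2) = count := by
        simp only [pvCnt, ht0, ha, if_pos] at hc ⊢; omega
      rw [if_pos hbr, if_neg ht]; omega

theorem pvBFind_append (xs ys : List (Int × String)) :
    pvBFind (xs ++ ys) =
      if xs.any (fun p => pvHasImport p.2) then pvBFind xs else pvBFind ys := by
  induction xs with
  | nil => simp [pvBFind]
  | cons p t ih =>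
    obtain ⟨i, line⟩ := p
    simp only [List.cons_append, pvBFind, List.any_cons, ih]
    cases h : pvHasImport line
    · rw [Bool.false_or]; simp
    · simp

theorem pvAny_rev_enum (l : List String) (s : Int) :
    ((PySem.List.enumerate l s).reverse.any (fun p => pvHasImport p.2))
      = l.any pvHasImport := by
  induction l generalizing s with
  | nil => simp [PySem.List.enumerate_nil]
  | cons a t ih =>
    simp only [PySem.List.enumerate_cons, List.reverse_cons, List.any_append, List.any_cons,
      List.any_nil, ih, List.any_cons]
    cases h : pvHasImport a <;> cases h2 : t.any pvHasImport <;> rfl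

theorem pvBFind_enum (l : List String) (s : Int) :
    pvBFind (PySem.List.enumerate l s).reverse =
      if 1 ≤ pvCnt l then s + pvLidx l else 0 := by
  induction l generalizing s with
  | nil => simp [PySem.List.enumerate_nil, pvBFind, pvCnt]
  | cons a t ih =>
    rw [PySem.List.enumerate_cons, List.reverse_cons, pvBFind_append, ih, pvAny_rev_enum]
    have hnn := pvCnt_nonneg t
    by_cases ht : 1 ≤ pvCnt t
    · rw [if_pos ((pvCnt_pos_iff_any t).mp ht)]
      have h1 : 1 ≤ pvCnt (a :: t) := by simp only [pvCnt]; split <;> omega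
      rw [if_pos ht, if_pos h1]
      simp only [pvLidx, if_pos ht]; omega
    · have ht0 : pvCnt t = 0 := by omega
      rw [if_neg (by rw [← pvCnt_pos_iff_any]; omega)]
      simp only [pvBFind, pvLidx, if_neg ht]
      by_cases ha : pvHasImport a = true
      · have h1 : 1 ≤ pvCnt (a :: t) := by simp [pvCnt, ha]; omega
        rw [if_pos ha, if_pos h1]; omega
      · have h1 : ¬ 1 ≤ pvCnt (a :: t) := by simp [pvCnt, ha]; omega
        rw [if_neg ha, if_neg h1]

-- ===== VERDICT =====
theorem checkFinalImportRow_spec : Claim_equal_checkFinalImportRow := by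
  intro l _
  unfold Spec_checkFinalImportRow checkFinalImportRow checkFinalImportRow_alt
  rw [pvFoldl_cnt, pvBFind_enum]
  have hnn := pvCnt_nonneg l
  by_cases h : 1 ≤ pvCnt l
  · rw [if_pos (by omega : (0 : Int) + pvCnt l ≠ 0), if_pos h]
    rw [pvALoop_eq l 0 0 (0 + pvCnt l) rfl h]
  · rw [if_neg (by omega : ¬ (0 : Int) + pvCnt l ≠ 0), if_neg h]
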